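-- pv_equiv track=rewrite | github.com/iabdul79/pyPlayground | slowQueenAttackSol.py | lMove
-- ===== SOURCE A (Python) =====
-- def lMove(n, qp, obs):
--   mv=0
--   i=qp[0]
--   j=qp[1]-1
--   while j>0:
--     if findOb(i,j, obs):
--       return mv
--     else:
--       mv+=1
--     j-=1
--   return mv
--
-- def findOb(r,c,obs):
--   for o in obs:
--     if o[0] == r and o[1] == c:
--       return 1
--   return 0
-- ===== SOURCE B (Python) =====
-- def lMove(n, qp, obs):
--     r, c = qp[0], qp[1]
--     cols = [o[1] for o in obs if len(o) >= 2 and o[0] == r and 1 <= o[1] < c]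
--     if c <= 1:
--         return 0
--     return c - 1 - max(cols) if cols else c - 1
-- ===== Notes on version B (the rewrite author's own statement) =====
-- stated objective: faster
-- what changed: Replaces the per-column while-loop (each step rescanning all obstacles via findOb) with a single pass taking the maximum blocking column in the queen's row and returning the distance to it.
import Mathlib
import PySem

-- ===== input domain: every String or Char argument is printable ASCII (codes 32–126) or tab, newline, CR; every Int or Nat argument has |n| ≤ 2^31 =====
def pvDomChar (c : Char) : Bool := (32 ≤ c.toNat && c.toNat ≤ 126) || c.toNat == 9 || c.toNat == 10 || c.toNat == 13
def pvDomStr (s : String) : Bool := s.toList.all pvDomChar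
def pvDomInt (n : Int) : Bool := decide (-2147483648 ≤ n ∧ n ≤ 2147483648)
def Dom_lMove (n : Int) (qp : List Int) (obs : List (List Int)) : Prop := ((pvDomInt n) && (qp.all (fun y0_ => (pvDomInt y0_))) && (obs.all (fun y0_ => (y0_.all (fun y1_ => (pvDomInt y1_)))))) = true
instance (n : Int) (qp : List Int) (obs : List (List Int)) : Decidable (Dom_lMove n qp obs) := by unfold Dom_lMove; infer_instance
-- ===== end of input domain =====

-- B replaces A's per-column scan with a single maximum over the blocking obstacles in the queen's row (asymptotically faster, one pass).


-- ===== PORT A =====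
def findOb (r c : Int) (obs : List (List Int)) : Int :=
  match obs with
  | [] => 0
  | o :: rest =>
    if PySem.List.pyGetD o 0 0 = r ∧ PySem.List.pyGetD o 1 0 = c then 1
    else findOb r c rest

def lMoveLoop (i : Int) (j : Int) (obs : List (List Int)) (mv : Int) : Nat → Int
  | 0 => mv
  | fuel + 1 =>
    if 0 < j then
      (if findOb i j obs = 1 then mv else lMoveLoop i (j - 1) obs (mv + 1) fuel)
    else mv

def lMove (n : Int) (qp : List Int) (obs : List (List Int)) : Int :=
  let i := PySem.List.pyGetD qp 0 0
  let j := PySem.List.pyGetD qp 1 0 - 1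
  lMoveLoop i j obs 0 j.toNat

-- ===== PORT B =====
-- the comprehension [o[1] for o in obs if len(o) >= 2 and o[0] == r and 1 <= o[1] < c]
def blockCols (r c : Int) (obs : List (List Int)) : List Int :=
  obs.filterMap (fun o =>
    if 2 ≤ o.length ∧ PySem.List.pyGetD o 0 0 = r ∧ 1 ≤ PySem.List.pyGetD o 1 0 ∧ PySem.List.pyGetD o 1 0 < c
    then some (PySem.List.pyGetD o 1 0) else none)

def lMove_alt (n : Int) (qp : List Int) (obs : List (List Int)) : Int :=
  let r := PySem.List.pyGetD qp 0 0
  let c := PySem.List.pyGetD qp 1 0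
  let cols := blockCols r c obs
  if c ≤ 1 then 0
  else
    match PySem.List.max? cols (fun x => x) with
    | some m => c - 1 - m
    | none => c - 1

-- ===== PRECONDITION & SPEC =====
-- an obstacle entry A's findOb can index without raising: nonempty, and if its row matches the
-- queen's row it also has a column entry
def goodOb (r : Int) (o : List Int) : Bool :=
  decide (1 ≤ o.length ∧ (o.getD 0 0 = r → 2 ≤ o.length))

-- Pre_ is exactly where Python A returns normally: qp long enough to index, and, when the loop
-- runs (qp[1] > 1), either every obstacle entry is indexable, or a match at the first probed
-- column qp[1]-1 occurs in obs before the first non-indexable entry (so A returns 0 without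
-- reaching it); everything excluded is an IndexError of A.
def Pre_lMove (n : Int) (qp : List Int) (obs : List (List Int)) : Prop :=
  2 ≤ qp.length ∧
  (1 < qp.getD 1 0 →
    (∀ o ∈ obs, goodOb (qp.getD 0 0) o = true) ∨
    (∃ o ∈ obs.takeWhile (goodOb (qp.getD 0 0)),
      o.getD 0 0 = qp.getD 0 0 ∧ o.getD 1 0 = qp.getD 1 0 - 1))
instance (n : Int) (qp : List Int) (obs : List (List Int)) : Decidable (Pre_lMove n qp obs) := by
  unfold Pre_lMove; infer_instance
def pvWitness_lMove : Int × List Int × List (List Int) := (8, [4, 4], [[4, 2], [3, 3]])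

def Spec_lMove (n : Int) (qp : List Int) (obs : List (List Int)) (out : Int) : Prop := out = lMove_alt n qp obs
instance (n : Int) (qp : List Int) (obs : List (List Int)) (out : Int) : Decidable (Spec_lMove n qp obs out) := by unfold Spec_lMove; infer_instance

-- ===== CLAIM (what is proved, stated in full; the proofs are below) =====
def Claim_equal_lMove : Prop := ∀ (n : Int) (qp : List Int) (obs : List (List Int)), Dom_lMove n qp obs → Pre_lMove n qp obs → Spec_lMove n qp obs (lMove n qp obs)

-- ===== LEMMAS AND PROOFS =====

lemma pyGetD1_len (o : List Int) (h : PySem.List.pyGetD o 1 0 ≠ 0) : 2 ≤ o.length := by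
  match o with
  | [] => simp [PySem.List.pyGetD, PySem.List.pyGet?, PySem.List.pyIdx?] at h
  | [a] => simp [PySem.List.pyGetD, PySem.List.pyGet?, PySem.List.pyIdx?] at h
  | a :: b :: t => simp

lemma findOb_eq_one_iff (r c : Int) (obs : List (List Int)) :
    findOb r c obs = 1 ↔
      ∃ o ∈ obs, PySem.List.pyGetD o 0 0 = r ∧ PySem.List.pyGetD o 1 0 = c := by
  induction obs with
  | nil => simp [findOb]
  | cons o rest ih =>
    simp only [findOb]
    split_ifs with h
    · simp [h]
    · simp only [List.mem_cons]
      constructor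
      · intro hr
        obtain ⟨o', ho', hp⟩ := ih.mp hr
        exact ⟨o', Or.inr ho', hp⟩
      · rintro ⟨o', (rfl | ho'), hp⟩
        · exact absurd hp h
        · exact ih.mpr ⟨o', ho', hp⟩

lemma findOb_zero_or_one (r c : Int) (obs : List (List Int)) :
    findOb r c obs = 0 ∨ findOb r c obs = 1 := by
  induction obs with
  | nil => simp [findOb]
  | cons o rest ih => simp only [findOb]; split_ifs <;> simp [ih]

lemma mem_blockCols (r c x : Int) (obs : List (List Int)) :
    x ∈ blockCols r c obs ↔
      ∃ o ∈ obs, PySem.List.pyGetD o 0 0 = r ∧ PySem.List.pyGetD o 1 0 = x ∧ 1 ≤ x ∧ x < c := by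
  simp only [blockCols, List.mem_filterMap]
  constructor
  · rintro ⟨o, ho, h⟩
    by_cases hc : 2 ≤ o.length ∧ PySem.List.pyGetD o 0 0 = r ∧ 1 ≤ PySem.List.pyGetD o 1 0 ∧
        PySem.List.pyGetD o 1 0 < c
    · rw [if_pos hc, Option.some_inj] at h
      exact ⟨o, ho, hc.2.1, h, h ▸ hc.2.2.1, h ▸ hc.2.2.2⟩
    · rw [if_neg hc] at h
      exact absurd h (by simp)
  · rintro ⟨o, ho, h0, h1, hge, hlt⟩
    refine ⟨o, ho, ?_⟩
    have hlen : 2 ≤ o.length := pyGetD1_len o (by omega)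
    rw [if_pos ⟨hlen, h0, h1 ▸ hge, h1 ▸ hlt⟩, h1]

lemma blockCols_empty (r : Int) (obs : List (List Int)) : blockCols r 1 obs = [] := by
  induction obs with
  | nil => rfl
  | cons o rest ih =>
    simp only [blockCols, List.filterMap_cons] at *
    have : ¬ (2 ≤ o.length ∧ PySem.List.pyGetD o 0 0 = r ∧ 1 ≤ PySem.List.pyGetD o 1 0 ∧
        PySem.List.pyGetD o 1 0 < 1) := by rintro ⟨_, _, h1, h2⟩; omega
    rw [if_neg this]; exact ih

lemma blockCols_step (r c : Int) (obs : List (List Int))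
    (h : ¬ ∃ o ∈ obs, PySem.List.pyGetD o 0 0 = r ∧ PySem.List.pyGetD o 1 0 = c) :
    blockCols r (c + 1) obs = blockCols r c obs := by
  unfold blockCols
  apply List.filterMap_congr
  intro o ho
  have hno : ¬ (PySem.List.pyGetD o 0 0 = r ∧ PySem.List.pyGetD o 1 0 = c) :=
    fun hp => h ⟨o, ho, hp⟩
  split_ifs with h1 h2 h2
  · rfl
  · obtain ⟨hl, e0, g1, l1⟩ := h1
    have : PySem.List.pyGetD o 1 0 ≠ c := fun hc => hno ⟨e0, hc⟩
    exact absurd ⟨hl, e0, g1, by omega⟩ h2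
  · obtain ⟨hl, e0, g1, l1⟩ := h2
    exact absurd ⟨hl, e0, g1, by omega⟩ h1
  · rfl

lemma loop_eq (r : Int) (obs : List (List Int)) :
    ∀ (t : Nat) (mv : Int),
      lMoveLoop r (t : Int) obs mv t =
        mv + (match PySem.List.max? (blockCols r ((t : Int) + 1) obs) (fun x => x) with
              | some m => (t : Int) - m
              | none => (t : Int)) := by
  intro t
  induction t with
  | zero =>
    intro mv
    rw [show ((0 : Nat) : Int) = 0 by rfl, show (0 : Int) + 1 = 1 by ring, blockCols_empty]
    simp [lMoveLoop, PySem.List.max?]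
  | succ t ih =>
    intro mv
    have hpos : (0 : Int) < ((t + 1 : Nat) : Int) := by push_cast; omega
    rw [show ((t + 1 : Nat) : Int) = (t : Int) + 1 by push_cast; ring] at *
    simp only [lMoveLoop, if_pos hpos]
    rcases findOb_zero_or_one r ((t : Int) + 1) obs with hz | ho
    · rw [if_neg (by omega : ¬ findOb r ((t : Int) + 1) obs = 1)]
      have hno : ¬ ∃ o ∈ obs, PySem.List.pyGetD o 0 0 = r ∧
          PySem.List.pyGetD o 1 0 = (t : Int) + 1 := by
        intro hx
        have := (findOb_eq_one_iff r ((t : Int) + 1) obs).mpr hx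
        omega
      rw [blockCols_step r ((t : Int) + 1) obs hno]
      rw [show (t : Int) + 1 - 1 = (t : Int) by ring]
      rw [ih (mv + 1)]
      rcases hmax : PySem.List.max? (blockCols r ((t : Int) + 1) obs) (fun x => x) with _ | m
      · simp only []; ring
      · simp only []; ring
    · rw [if_pos ho]
      obtain ⟨o, hmem, h0, h1⟩ := (findOb_eq_one_iff r ((t : Int) + 1) obs).mp ho
      have hmemc : ((t : Int) + 1) ∈ blockCols r ((t : Int) + 1 + 1) obs :=
        (mem_blockCols r _ _ obs).mpr ⟨o, hmem, h0, h1, by omega, by omega⟩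
      rcases hmax : PySem.List.max? (blockCols r ((t : Int) + 1 + 1) obs) (fun x => x) with _ | m
      · rw [PySem.List.max?_eq_none_iff] at hmax
        rw [hmax] at hmemc
        simp at hmemc
      · have hm_mem := PySem.List.max?_mem hmax
        have hub := PySem.List.max?_isMax hmax _ hmemc
        have hle : m ≤ (t : Int) + 1 := by
          have := (mem_blockCols r _ _ obs).mp hm_mem
          obtain ⟨_, _, _, _, _, hlt⟩ := this
          omega
        have : m = (t : Int) + 1 := le_antisymm hle hub
        simp only [this]
        ring

lemma lMove_main (r c : Int) (obs : List (List Int)) :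
    lMoveLoop r (c - 1) obs 0 (c - 1).toNat =
      (if c ≤ 1 then 0
       else match PySem.List.max? (blockCols r c obs) (fun x => x) with
            | some m => c - 1 - m
            | none => c - 1) := by
  by_cases hle : c ≤ 1
  · rw [if_pos hle, show (c - 1).toNat = 0 by omega]
    rfl
  · rw [if_neg hle]
    have hcast : ((c - 1).toNat : Int) = c - 1 := by omega
    have h := loop_eq r obs (c - 1).toNat 0
    rw [hcast, show c - 1 + 1 = c by ring] at h
    rw [h]
    rcases hmax : PySem.List.max? (blockCols r c obs) (fun x => x) with _ | m
    · simp only []; ring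
    · simp only []; ring

-- ===== VERDICT (by name: the statement is the Claim_ definition above) =====
theorem lMove_spec : Claim_equal_lMove := by
  intro n qp obs _ _
  unfold Spec_lMove
  exact lMove_main (PySem.List.pyGetD qp 0 0) (PySem.List.pyGetD qp 1 0) obs
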